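-- pv_equiv track=rewrite | github.com/Shadowfang116/CDS | backend/app/services/export_bank_pack.py | _count_by_severity_status
-- ===== SOURCE A (Python) =====
-- from typing import List, Dict, Any, Tuple
--
-- def _count_by_severity_status(items: List[Dict[str, Any]]) -> Dict[str, Dict[str, int]]:
--     """Count items by severity and status."""
--     counts = {
--         "High": {"Open": 0, "Resolved": 0, "Waived": 0},
--         "Medium": {"Open": 0, "Resolved": 0, "Waived": 0},
--         "Low": {"Open": 0, "Resolved": 0, "Waived": 0},
--     }
--
--     for item in items:
--         sev = item.get("severity", "Medium")
--         status = item.get("status", "Open")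
--         if sev in counts and status in counts[sev]:
--             counts[sev][status] += 1
--
--     return counts
-- ===== SOURCE B (Python) =====
-- from typing import List, Dict, Any
--
-- def _count_by_severity_status(items: List[Dict[str, Any]]) -> Dict[str, Dict[str, int]]:
--     """Count items by severity and status: for each fixed (severity, status) cell,
--     scan the items and count matches -- no accumulator dict, one pass per cell."""
--     def cell(sev: str, st: str) -> int:
--         return sum(1 for it in items
--                    if it.get("severity", "Medium") == sev and it.get("status", "Open") == st)
--     return {sev: {st: cell(sev, st) for st in ("Open", "Resolved", "Waived")}
--             for sev in ("High", "Medium", "Low")}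
-- ===== Notes on version B (the rewrite author's own statement) =====
-- stated objective: alternative
-- what changed: B keeps no counting dictionary at all: it iterates the fixed 3x3 severity/status template and counts, per cell, the matching items with a fresh scan (nine staged passes), where A makes one pass incrementing a pre-built nested dict under membership guards.
import Mathlib
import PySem

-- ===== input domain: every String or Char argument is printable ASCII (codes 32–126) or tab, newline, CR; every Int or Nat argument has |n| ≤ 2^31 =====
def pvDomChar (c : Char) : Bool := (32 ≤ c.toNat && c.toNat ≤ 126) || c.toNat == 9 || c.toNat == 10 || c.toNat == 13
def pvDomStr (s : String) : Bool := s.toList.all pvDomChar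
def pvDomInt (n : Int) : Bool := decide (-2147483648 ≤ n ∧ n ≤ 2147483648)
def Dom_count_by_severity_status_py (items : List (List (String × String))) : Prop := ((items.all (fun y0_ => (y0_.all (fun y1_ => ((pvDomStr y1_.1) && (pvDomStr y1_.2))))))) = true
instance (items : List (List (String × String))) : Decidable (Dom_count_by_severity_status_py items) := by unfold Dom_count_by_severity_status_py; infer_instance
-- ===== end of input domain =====

-- B drops the counting dictionary entirely: it walks the fixed 3×3 severity/status template and counts
-- each cell with a fresh scan over the items (nine staged passes), vs A's single guarded-increment pass
-- into a pre-built nested dict (objective: alternative; not faster).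


-- ===== PORT A =====
-- the loop body of A: guarded 'counts[sev][status] += 1'
def pvStepA (counts : PySem.Dict String (PySem.Dict String Int)) (item : List (String × String)) :
    PySem.Dict String (PySem.Dict String Int) :=
  let sev := (PySem.Dict.mk item).getD "severity" "Medium"
  let status := (PySem.Dict.mk item).getD "status" "Open"
  if counts.contains sev && (counts.getD sev PySem.Dict.empty).contains status then
    counts.modify sev PySem.Dict.empty (fun d => d.modify status 0 (· + 1))
  else counts

def count_by_severity_status_py (items : List (List (String × String))) : List (String × List (String × Int)) :=
  let counts : PySem.Dict String (PySem.Dict String Int) :=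
    PySem.Dict.mk
      [("High", PySem.Dict.mk [("Open", 0), ("Resolved", 0), ("Waived", 0)]),
       ("Medium", PySem.Dict.mk [("Open", 0), ("Resolved", 0), ("Waived", 0)]),
       ("Low", PySem.Dict.mk [("Open", 0), ("Resolved", 0), ("Waived", 0)])]
  let counts := items.foldl pvStepA counts
  counts.items.map (fun p => (p.1, p.2.items))

-- ===== PORT B =====
-- Source B's per-cell scan: sum(1 for it in items if …) as a fold adding 1 on a match
def pvCellB (items : List (List (String × String))) (sev st : String) : Int :=
  items.foldl (fun acc it =>
    if (PySem.Dict.mk it).getD "severity" "Medium" = sev ∧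
       (PySem.Dict.mk it).getD "status" "Open" = st then acc + 1 else acc) 0

def count_by_severity_status_py_alt (items : List (List (String × String))) : List (String × List (String × Int)) :=
  ["High", "Medium", "Low"].map (fun sev =>
    (sev, ["Open", "Resolved", "Waived"].map (fun st => (st, pvCellB items sev st))))

-- ===== PRECONDITION & SPEC =====
def Spec_count_by_severity_status_py (items : List (List (String × String))) (out : List (String × List (String × Int))) : Prop := out = count_by_severity_status_py_alt items
instance (items : List (List (String × String))) (out : List (String × List (String × Int))) : Decidable (Spec_count_by_severity_status_py items out) := by unfold Spec_count_by_severity_status_py; infer_instance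

-- ===== CLAIM (what is proved, stated in full; the proofs are below) =====
def Claim_equal_count_by_severity_status_py : Prop := ∀ (items : List (List (String × String))), Dom_count_by_severity_status_py items → Spec_count_by_severity_status_py items (count_by_severity_status_py items)

-- ===== LEMMAS AND PROOFS =====

-- the (severity, status) key both programs read from an item
def pvKey (item : List (String × String)) : String × String :=
  ((PySem.Dict.mk item).getD "severity" "Medium", (PySem.Dict.mk item).getD "status" "Open")

-- the shape A's nested dict keeps throughout the loop
def pvMk (a b c d e f g h i : Int) : PySem.Dict String (PySem.Dict String Int) :=
  PySem.Dict.mk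
    [("High", PySem.Dict.mk [("Open", a), ("Resolved", b), ("Waived", c)]),
     ("Medium", PySem.Dict.mk [("Open", d), ("Resolved", e), ("Waived", f)]),
     ("Low", PySem.Dict.mk [("Open", g), ("Resolved", h), ("Waived", i)])]

def pvInd (s st : String) (item : List (String × String)) : Int :=
  if pvKey item = (s, st) then 1 else 0

lemma pvStepA_mk (item : List (String × String)) (a b c d e f g h i : Int) :
    pvStepA (pvMk a b c d e f g h i) item =
      pvMk (a + pvInd "High" "Open" item) (b + pvInd "High" "Resolved" item) (c + pvInd "High" "Waived" item)
           (d + pvInd "Medium" "Open" item) (e + pvInd "Medium" "Resolved" item) (f + pvInd "Medium" "Waived" item)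
           (g + pvInd "Low" "Open" item) (h + pvInd "Low" "Resolved" item) (i + pvInd "Low" "Waived" item) := by
  unfold pvStepA pvInd pvKey
  generalize (PySem.Dict.mk item).getD "severity" "Medium" = sev
  generalize (PySem.Dict.mk item).getD "status" "Open" = st
  by_cases h1 : sev = "High"
  case pos =>
    subst h1
    by_cases h4 : st = "Open"
    case pos => subst h4; rw [if_pos (by simp [pvMk, PySem.Dict.contains_mk, PySem.Dict.getD, PySem.Dict.get?_mk_cons])]; simp only [Prod.mk.injEq, String.reduceEq, and_self, and_false, false_and, if_true, if_false, add_zero]; rfl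
    case neg =>
    by_cases h5 : st = "Resolved"
    case pos => subst h5; rw [if_pos (by simp [pvMk, PySem.Dict.contains_mk, PySem.Dict.getD, PySem.Dict.get?_mk_cons])]; simp only [Prod.mk.injEq, String.reduceEq, and_self, and_false, false_and, if_true, if_false, add_zero]; rfl
    case neg =>
    by_cases h6 : st = "Waived"
    case pos => subst h6; rw [if_pos (by simp [pvMk, PySem.Dict.contains_mk, PySem.Dict.getD, PySem.Dict.get?_mk_cons])]; simp only [Prod.mk.injEq, String.reduceEq, and_self, and_false, false_and, if_true, if_false, add_zero]; rfl
    case neg =>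
      have h4' : ¬ "Open" = st := fun h => h4 h.symm
      have h5' : ¬ "Resolved" = st := fun h => h5 h.symm
      have h6' : ¬ "Waived" = st := fun h => h6 h.symm
      rw [if_neg (by simp [pvMk, PySem.Dict.contains_mk, PySem.Dict.getD, PySem.Dict.get?_mk_cons, h4', h5', h6'])]
      simp [Prod.ext_iff, h4, h5, h6]
  case neg =>
  by_cases h2 : sev = "Medium"
  case pos =>
    subst h2
    by_cases h4 : st = "Open"
    case pos => subst h4; rw [if_pos (by simp [pvMk, PySem.Dict.contains_mk, PySem.Dict.getD, PySem.Dict.get?_mk_cons])]; simp only [Prod.mk.injEq, String.reduceEq, and_self, and_false, false_and, if_true, if_false, add_zero]; rfl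
    case neg =>
    by_cases h5 : st = "Resolved"
    case pos => subst h5; rw [if_pos (by simp [pvMk, PySem.Dict.contains_mk, PySem.Dict.getD, PySem.Dict.get?_mk_cons])]; simp only [Prod.mk.injEq, String.reduceEq, and_self, and_false, false_and, if_true, if_false, add_zero]; rfl
    case neg =>
    by_cases h6 : st = "Waived"
    case pos => subst h6; rw [if_pos (by simp [pvMk, PySem.Dict.contains_mk, PySem.Dict.getD, PySem.Dict.get?_mk_cons])]; simp only [Prod.mk.injEq, String.reduceEq, and_self, and_false, false_and, if_true, if_false, add_zero]; rfl
    case neg =>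
      have h4' : ¬ "Open" = st := fun h => h4 h.symm
      have h5' : ¬ "Resolved" = st := fun h => h5 h.symm
      have h6' : ¬ "Waived" = st := fun h => h6 h.symm
      rw [if_neg (by simp [pvMk, PySem.Dict.contains_mk, PySem.Dict.getD, PySem.Dict.get?_mk_cons, h4', h5', h6'])]
      simp [Prod.ext_iff, h4, h5, h6]
  case neg =>
  by_cases h3 : sev = "Low"
  case pos =>
    subst h3
    by_cases h4 : st = "Open"
    case pos => subst h4; rw [if_pos (by simp [pvMk, PySem.Dict.contains_mk, PySem.Dict.getD, PySem.Dict.get?_mk_cons])]; simp only [Prod.mk.injEq, String.reduceEq, and_self, and_false, false_and, if_true, if_false, add_zero]; rfl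
    case neg =>
    by_cases h5 : st = "Resolved"
    case pos => subst h5; rw [if_pos (by simp [pvMk, PySem.Dict.contains_mk, PySem.Dict.getD, PySem.Dict.get?_mk_cons])]; simp only [Prod.mk.injEq, String.reduceEq, and_self, and_false, false_and, if_true, if_false, add_zero]; rfl
    case neg =>
    by_cases h6 : st = "Waived"
    case pos => subst h6; rw [if_pos (by simp [pvMk, PySem.Dict.contains_mk, PySem.Dict.getD, PySem.Dict.get?_mk_cons])]; simp only [Prod.mk.injEq, String.reduceEq, and_self, and_false, false_and, if_true, if_false, add_zero]; rfl
    case neg =>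
      have h4' : ¬ "Open" = st := fun h => h4 h.symm
      have h5' : ¬ "Resolved" = st := fun h => h5 h.symm
      have h6' : ¬ "Waived" = st := fun h => h6 h.symm
      rw [if_neg (by simp [pvMk, PySem.Dict.contains_mk, PySem.Dict.getD, PySem.Dict.get?_mk_cons, h4', h5', h6'])]
      simp [Prod.ext_iff, h4, h5, h6]
  case neg =>
    have h1' : ¬ "High" = sev := fun h => h1 h.symm
    have h2' : ¬ "Medium" = sev := fun h => h2 h.symm
    have h3' : ¬ "Low" = sev := fun h => h3 h.symm
    rw [if_neg (by simp [pvMk, PySem.Dict.contains_mk, h1', h2', h3'])]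
    simp [Prod.ext_iff, h1, h2, h3]

lemma pvFoldA (l : List (List (String × String))) (a b c d e f g h i : Int) :
    l.foldl pvStepA (pvMk a b c d e f g h i) =
      pvMk (a + ((l.map pvKey).count ("High", "Open") : Int)) (b + ((l.map pvKey).count ("High", "Resolved") : Int)) (c + ((l.map pvKey).count ("High", "Waived") : Int))
           (d + ((l.map pvKey).count ("Medium", "Open") : Int)) (e + ((l.map pvKey).count ("Medium", "Resolved") : Int)) (f + ((l.map pvKey).count ("Medium", "Waived") : Int))
           (g + ((l.map pvKey).count ("Low", "Open") : Int)) (h + ((l.map pvKey).count ("Low", "Resolved") : Int)) (i + ((l.map pvKey).count ("Low", "Waived") : Int)) := by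
  induction l generalizing a b c d e f g h i with
  | nil => simp
  | cons x t ih =>
    rw [List.foldl_cons, pvStepA_mk, ih]
    simp only [List.map_cons, List.count_cons, pvInd, pvMk, beq_iff_eq,
      PySem.Dict.mk.injEq, List.cons.injEq, Prod.mk.injEq, and_true, true_and]
    and_intros <;> (split_ifs <;> push_cast <;> ring)

-- B's per-cell scan counts exactly the items whose key is that cell
lemma pvCellB_count (l : List (List (String × String))) (sev st : String) :
    pvCellB l sev st = ((l.map pvKey).count (sev, st) : Int) := by
  unfold pvCellB
  suffices h : ∀ acc : Int, l.foldl (fun acc it =>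
      if (PySem.Dict.mk it).getD "severity" "Medium" = sev ∧
         (PySem.Dict.mk it).getD "status" "Open" = st then acc + 1 else acc) acc
      = acc + ((l.map pvKey).count (sev, st) : Int) by simpa using h 0
  induction l with
  | nil => simp
  | cons x t ih =>
    intro acc
    simp only [List.foldl_cons, List.map_cons, List.count_cons, ih, pvKey, beq_iff_eq, Prod.mk.injEq]
    split_ifs <;> push_cast <;> ring

-- ===== VERDICT (by name: the statement is the Claim_ definition above) =====
theorem count_by_severity_status_py_spec : Claim_equal_count_by_severity_status_py := by
  intro items _
  unfold Spec_count_by_severity_status_py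
  unfold count_by_severity_status_py count_by_severity_status_py_alt
  show ((items.foldl pvStepA (pvMk 0 0 0 0 0 0 0 0 0)).items.map (fun p => (p.1, p.2.items))) = _
  rw [pvFoldA]
  simp only [List.map_cons, List.map_nil, pvCellB_count, pvMk]
  norm_num
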